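-- pv_equiv track=rewrite | github.com/AuroSoni/anthropic-agent | anthropic_agent/common_tools/apply_patch.py | _find_single_scope
-- ===== SOURCE A (Python) =====
-- from typing import Any, Callable, Dict, List, Literal, NamedTuple, Optional, Tuple
--
-- def _find_single_scope(
--     lines: List[str],
--     scope_pattern: str,
--     start: int,
-- ) -> Tuple[int, int]:
--     """Find a single scope signature in file and return position after it.
--
--     Args:
--         lines: The file content split into lines.
--         scope_pattern: The scope signature to search for (e.g., "def func_name").
--         start: The starting index for the search.
--
--     Returns:
--         Tuple of (index_after_scope, fuzz_level) where index_after_scope is the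
--         position immediately after the scope signature, or (-1, 0) if not found.
--     """
--     scope_stripped = scope_pattern.strip()
--
--     # Level 0: Match at line start (after stripping leading whitespace)
--     for i in range(start, len(lines)):
--         line_stripped = lines[i].lstrip()
--         if line_stripped.startswith(scope_stripped):
--             return i + 1, 0
--
--     # Level 1: Fallback to substring match with fuzz penalty
--     for i in range(start, len(lines)):
--         if scope_stripped in lines[i]:
--             return i + 1, 1
--
--     return -1, 0
-- ===== SOURCE B (Python) =====
-- from typing import List, Tuple
--
-- def _find_single_scope(
--     lines: List[str],
--     scope_pattern: str,
--     start: int,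
-- ) -> Tuple[int, int]:
--     """Single pass: return immediately on a level-0 (line-start) match, and
--     remember only the first level-1 (substring) hit as a deferred fallback."""
--     scope_stripped = scope_pattern.strip()
--     first_fuzz = None
--     for i in range(start, len(lines)):
--         line = lines[i]
--         if line.lstrip().startswith(scope_stripped):
--             return i + 1, 0
--         if first_fuzz is None and scope_stripped in line:
--             first_fuzz = i
--     if first_fuzz is not None:
--         return first_fuzz + 1, 1
--     return -1, 0
-- ===== Notes on version B (the rewrite author's own statement) =====
-- stated objective: alternative
-- what changed: Replaces A's two independent full scans (level-0 pass, then level-1 pass) with a single loop that returns early on a level-0 match and defers the first level-1 hit as a fallback.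
import Mathlib
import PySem

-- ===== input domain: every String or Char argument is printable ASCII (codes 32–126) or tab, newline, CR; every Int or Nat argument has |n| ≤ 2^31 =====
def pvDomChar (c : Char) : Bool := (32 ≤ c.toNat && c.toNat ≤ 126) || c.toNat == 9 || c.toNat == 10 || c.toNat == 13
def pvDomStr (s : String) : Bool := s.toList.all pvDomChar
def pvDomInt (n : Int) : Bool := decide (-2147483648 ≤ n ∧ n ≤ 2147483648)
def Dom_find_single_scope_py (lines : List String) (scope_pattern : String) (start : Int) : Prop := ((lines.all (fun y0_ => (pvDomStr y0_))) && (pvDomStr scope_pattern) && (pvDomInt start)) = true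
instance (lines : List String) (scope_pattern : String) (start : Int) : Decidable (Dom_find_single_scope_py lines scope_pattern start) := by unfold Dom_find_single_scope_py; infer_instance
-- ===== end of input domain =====

-- B merges A's two scans into one pass that defers the first substring hit; same return value.

-- ===== PORT A =====
-- first loop: level-0 match at line start (after lstrip)
def pvA_lvl0 (lines : List String) (s : String) : List Int → Option Int
  | [] => none
  | i :: rest =>
    if PySem.Str.startswith (PySem.Str.lstrip (PySem.List.pyGetD lines i "")) s then some (i + 1)
    else pvA_lvl0 lines s rest

-- second loop: level-1 substring match
def pvA_lvl1 (lines : List String) (s : String) : List Int → Option Int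
  | [] => none
  | i :: rest =>
    if PySem.Str.isIn s (PySem.List.pyGetD lines i "") then some (i + 1)
    else pvA_lvl1 lines s rest

def find_single_scope_py (lines : List String) (scope_pattern : String) (start : Int) : Int × Int :=
  let s := PySem.Str.strip scope_pattern
  let idxs := PySem.List.pyRange start (PySem.List.len lines) 1
  match pvA_lvl0 lines s idxs with
  | some j => (j, 0)
  | none =>
    match pvA_lvl1 lines s idxs with
    | some j => (j, 1)
    | none => (-1, 0)

-- ===== PORT B =====
-- one pass; fz holds the first level-1 hit (None sentinel)
def pvB_loop (lines : List String) (s : String) : List Int → Option Int → Int × Int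
  | [], fz =>
    match fz with
    | some j => (j + 1, 1)
    | none => (-1, 0)
  | i :: rest, fz =>
    let line := PySem.List.pyGetD lines i ""
    if PySem.Str.startswith (PySem.Str.lstrip line) s then (i + 1, 0)
    else pvB_loop lines s rest (if fz.isNone && PySem.Str.isIn s line then some i else fz)

def find_single_scope_py_alt (lines : List String) (scope_pattern : String) (start : Int) : Int × Int :=
  pvB_loop lines (PySem.Str.strip scope_pattern) (PySem.List.pyRange start (PySem.List.len lines) 1) none

-- ===== PRECONDITION & SPEC =====
-- Pre_ excludes exactly the inputs where Python A raises IndexError (start below -len(lines),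
-- so the loop reaches an index before the wraparound range); B raises there too.
def Pre_find_single_scope_py (lines : List String) (scope_pattern : String) (start : Int) : Prop :=
  -(lines.length : Int) ≤ start
instance (lines : List String) (scope_pattern : String) (start : Int) : Decidable (Pre_find_single_scope_py lines scope_pattern start) := by unfold Pre_find_single_scope_py; infer_instance

def pvWitness_find_single_scope_py : List String × String × Int := (["def f():", "  pass"], "def f", 0)

def Spec_find_single_scope_py (lines : List String) (scope_pattern : String) (start : Int) (out : Int × Int) : Prop := out = find_single_scope_py_alt lines scope_pattern start
instance (lines : List String) (scope_pattern : String) (start : Int) (out : Int × Int) : Decidable (Spec_find_single_scope_py lines scope_pattern start out) := by unfold Spec_find_single_scope_py; infer_instance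

-- ===== CLAIM (what is proved, stated in full; the proofs are below) =====
def Claim_equal_find_single_scope_py : Prop := ∀ (lines : List String) (scope_pattern : String) (start : Int), Dom_find_single_scope_py lines scope_pattern start → Pre_find_single_scope_py lines scope_pattern start → Spec_find_single_scope_py lines scope_pattern start (find_single_scope_py lines scope_pattern start)

-- ===== LEMMAS AND PROOFS =====

-- the single pass equals the two-pass composition, for any starting fallback fz
theorem pvB_loop_eq (lines : List String) (s : String) (idxs : List Int) (fz : Option Int) :
    pvB_loop lines s idxs fz =
      match pvA_lvl0 lines s idxs with
      | some j => (j, 0)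
      | none =>
        match fz with
        | some j0 => (j0 + 1, 1)
        | none =>
          match pvA_lvl1 lines s idxs with
          | some j => (j, 1)
          | none => (-1, 0) := by
  induction idxs generalizing fz with
  | nil => cases fz <;> rfl
  | cons i rest ih =>
    simp only [pvB_loop, pvA_lvl0, pvA_lvl1]
    by_cases h0 : PySem.Str.startswith (PySem.Str.lstrip (PySem.List.pyGetD lines i "")) s = true
    · rw [if_pos h0, if_pos h0]
    · rw [if_neg h0, if_neg h0, ih]
      cases fz with
      | some j0 => rfl
      | none =>
        by_cases h1 : PySem.Str.isIn s (PySem.List.pyGetD lines i "") = true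
        · rw [if_pos h1, if_pos (show (Option.isNone (none : Option Int) && PySem.Str.isIn s (PySem.List.pyGetD lines i "")) = true by simpa using h1)]
        · rw [if_neg h1, if_neg (show ¬ (Option.isNone (none : Option Int) && PySem.Str.isIn s (PySem.List.pyGetD lines i "")) = true by simpa using h1)]

-- ===== VERDICT (by name: the statement is the Claim_ definition above) =====
theorem find_single_scope_py_spec : Claim_equal_find_single_scope_py := by
  intro lines scope_pattern start _ _
  unfold Spec_find_single_scope_py find_single_scope_py find_single_scope_py_alt
  rw [pvB_loop_eq]
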